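-- pv_equiv track=rewrite | github.com/AreteDriver/animus | packages/forge/src/animus_forge/agents/provider_wrapper.py | _split_system
-- ===== SOURCE A (Python) =====
-- def _split_system(messages: list[dict]) -> tuple[str | None, list[dict]]:
--     """Split system messages from conversation messages.
--
--     Args:
--         messages: Mixed list of messages.
--
--     Returns:
--         Tuple of (combined_system_prompt, filtered_messages).
--     """
--     system_prompt = None
--     filtered = []
--     for msg in messages:
--         if msg.get("role") == "system":
--             if system_prompt is None:
--                 system_prompt = msg.get("content", "")
--             else:
--                 system_prompt += "\n\n" + msg.get("content", "")
--         else: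
--             filtered.append(msg)
--     return system_prompt, filtered
-- ===== SOURCE B (Python) =====
-- def _split_system(messages: list[dict]) -> tuple[str | None, list[dict]]:
--     """Split system messages from conversation messages (divide and conquer).
--
--     Recursively split the list in half, solve each half, and merge:
--     filtered lists concatenate, and the two halves' system prompts are
--     joined with "\n\n" (a missing side contributes nothing). Correct
--     because joining contents with "\n\n" is associative over the
--     in-order sequence of system messages.
--     """
--     n = len(messages)
--     if n == 0:
--         return None, []
--     if n == 1:
--         m = messages[0]
--         if m.get("role") == "system":
--             return m.get("content", ""), []
--         return None, [m]
--     mid = n // 2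
--     p1, f1 = _split_system(messages[:mid])
--     p2, f2 = _split_system(messages[mid:])
--     if p1 is None:
--         p = p2
--     elif p2 is None:
--         p = p1
--     else:
--         p = p1 + "\n\n" + p2
--     return p, f1 + f2
-- ===== Notes on version B (the rewrite author's own statement) =====
-- stated objective: alternative
-- what changed: Replaces A's single left-to-right loop with Optional-state string accumulation by a divide-and-conquer recursion: split the list in half, solve each half independently, then merge the two results (concatenate filtered lists, join the halves' prompts with '\n\n'), relying on associativity of the join.
import Mathlib
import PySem

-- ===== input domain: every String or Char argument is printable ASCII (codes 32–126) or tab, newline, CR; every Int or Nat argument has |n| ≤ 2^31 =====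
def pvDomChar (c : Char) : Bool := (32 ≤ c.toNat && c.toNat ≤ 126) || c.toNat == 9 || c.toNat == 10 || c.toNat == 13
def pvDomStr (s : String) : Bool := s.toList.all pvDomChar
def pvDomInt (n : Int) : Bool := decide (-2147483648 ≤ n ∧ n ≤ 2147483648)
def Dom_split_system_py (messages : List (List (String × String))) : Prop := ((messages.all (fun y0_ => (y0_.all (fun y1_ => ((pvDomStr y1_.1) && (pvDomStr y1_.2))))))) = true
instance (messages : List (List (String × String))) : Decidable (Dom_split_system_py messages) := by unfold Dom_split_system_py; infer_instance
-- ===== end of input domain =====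

-- B replaces A's single interleaved loop (running string concatenation with an Option accumulator)
-- by a divide-and-conquer recursion: split the list in half, solve halves, merge the results.


-- ===== PORT A =====
-- shared helpers: msg.get("role") == "system" test and msg.get("content", "")
def pvIsSystem (m : List (String × String)) : Bool :=
  PySem.Dict.get? (PySem.Dict.mk m) "role" == some "system"
def pvContent (m : List (String × String)) : String :=
  PySem.Dict.getD (PySem.Dict.mk m) "content" ""

-- one iteration of A's loop over the state (system_prompt, filtered)
def pvSysStep (st : Option String × List (List (String × String))) (msg : List (String × String)) :
    Option String × List (List (String × String)) :=
  if pvIsSystem msg then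
    match st.1 with
    | none => (some (pvContent msg), st.2)
    | some s => (some (s ++ ("\n\n" ++ pvContent msg)), st.2)
  else (st.1, st.2 ++ [msg])

def split_system_py (messages : List (List (String × String))) : Option String × (List (List (String × String))) :=
  messages.foldl pvSysStep (none, [])

-- ===== PORT B =====
-- merge of the two halves' prompts (B's if/elif/else chain)
def pvMergeP : Option String → Option String → Option String
  | none, p2 => p2
  | some p1, none => some p1
  | some p1, some p2 => some (p1 ++ "\n\n" ++ p2)

def split_system_py_alt (messages : List (List (String × String))) : Option String × (List (List (String × String))) :=
  match messages with
  | [] => (none, [])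
  | [m] => if pvIsSystem m then (some (pvContent m), []) else (none, [m])
  | m1 :: m2 :: rest =>
    let l := m1 :: m2 :: rest
    let mid := l.length / 2
    let r1 := split_system_py_alt (l.take mid)
    let r2 := split_system_py_alt (l.drop mid)
    (pvMergeP r1.1 r2.1, r1.2 ++ r2.2)
termination_by messages.length
decreasing_by
  · simp [List.length_take]; omega
  · simp; omega

-- ===== PRECONDITION & SPEC =====
def Spec_split_system_py (messages : List (List (String × String))) (out : Option String × (List (List (String × String)))) : Prop := out = split_system_py_alt messages
instance (messages : List (List (String × String))) (out : Option String × (List (List (String × String)))) : Decidable (Spec_split_system_py messages out) := by unfold Spec_split_system_py; infer_instance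

-- ===== CLAIM (what is proved, stated in full; the proofs are below) =====
def Claim_equal_split_system_py : Prop := ∀ (messages : List (List (String × String))), Dom_split_system_py messages → Spec_split_system_py messages (split_system_py messages)

-- ===== LEMMAS AND PROOFS =====

-- the common characterisation: prompt from the system contents, filtered = non-system messages
def pvParts (msgs : List (List (String × String))) : List String :=
  (msgs.filter (fun m => pvIsSystem m)).map pvContent

def pvJoinOpt : List String → Option String
  | [] => none
  | p :: ps => some (ps.foldl (fun a c => a ++ ("\n\n" ++ c)) p)

def pvSpecFn (msgs : List (List (String × String))) :
    Option String × List (List (String × String)) :=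
  (pvJoinOpt (pvParts msgs), msgs.filter (fun m => !(pvIsSystem m)))

-- A's loop once the prompt is some s
lemma pv_loop_some (msgs : List (List (String × String))) (s : String)
    (acc : List (List (String × String))) :
    msgs.foldl pvSysStep (some s, acc) =
      (some ((pvParts msgs).foldl (fun a c => a ++ ("\n\n" ++ c)) s),
       acc ++ msgs.filter (fun m => !(pvIsSystem m))) := by
  induction msgs generalizing s acc with
  | nil => simp [pvParts]
  | cons m ms ih =>
    by_cases h : pvIsSystem m = true
    · simp [pvSysStep, h, ih, pvParts]
    · simp only [List.foldl_cons, pvSysStep, h]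
      simp [h, ih, pvParts]

-- A's loop from the initial none state
lemma pv_loop_none (msgs : List (List (String × String)))
    (acc : List (List (String × String))) :
    msgs.foldl pvSysStep (none, acc) =
      (pvJoinOpt (pvParts msgs), acc ++ msgs.filter (fun m => !(pvIsSystem m))) := by
  induction msgs generalizing acc with
  | nil => simp [pvParts, pvJoinOpt]
  | cons m ms ih =>
    by_cases h : pvIsSystem m = true
    · simp [pvSysStep, h, pv_loop_some, pvParts, pvJoinOpt]
    · simp only [List.foldl_cons, pvSysStep, h]
      simp [h, ih, pvParts]

lemma pvA_eq_spec (msgs : List (List (String × String))) :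
    split_system_py msgs = pvSpecFn msgs := by
  unfold split_system_py pvSpecFn
  rw [pv_loop_none]; simp

-- a prefix distributes over the join fold
lemma pv_fold_prefix (qs : List String) (s q : String) :
    qs.foldl (fun a c => a ++ ("\n\n" ++ c)) (s ++ q) =
      s ++ qs.foldl (fun a c => a ++ ("\n\n" ++ c)) q := by
  induction qs generalizing q with
  | nil => rfl
  | cons r rs ih => simp [List.foldl_cons, ih, String.append_assoc]

-- pvJoinOpt is a monoid-like homomorphism along list append, merged by pvMergeP
lemma pv_joinOpt_append (l1 l2 : List String) :
    pvJoinOpt (l1 ++ l2) = pvMergeP (pvJoinOpt l1) (pvJoinOpt l2) := by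
  cases l1 with
  | nil => simp [pvJoinOpt, pvMergeP]
  | cons p ps =>
    cases l2 with
    | nil => simp [pvJoinOpt, pvMergeP]
    | cons q qs =>
      simp only [pvJoinOpt, pvMergeP, List.cons_append, List.foldl_append, List.foldl_cons]
      rw [← pv_fold_prefix qs _ q]
      simp [String.append_assoc]

lemma pv_parts_append (l1 l2 : List (List (String × String))) :
    pvParts (l1 ++ l2) = pvParts l1 ++ pvParts l2 := by
  simp [pvParts]

-- the spec itself merges along append
lemma pv_spec_append (l1 l2 : List (List (String × String))) :
    pvSpecFn (l1 ++ l2) =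
      (pvMergeP (pvSpecFn l1).1 (pvSpecFn l2).1, (pvSpecFn l1).2 ++ (pvSpecFn l2).2) := by
  simp [pvSpecFn, pv_parts_append, pv_joinOpt_append]

lemma pvB_eq_spec (msgs : List (List (String × String))) :
    split_system_py_alt msgs = pvSpecFn msgs := by
  generalize h : msgs.length = n
  induction n using Nat.strong_induction_on generalizing msgs with
  | _ n ih =>
    cases msgs with
    | nil => simp [split_system_py_alt, pvSpecFn, pvParts, pvJoinOpt]
    | cons m1 t =>
      cases t with
      | nil =>
        by_cases hs : pvIsSystem m1 = true <;>
          simp [split_system_py_alt, pvSpecFn, pvParts, pvJoinOpt, hs]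
      | cons m2 rest =>
        subst h
        conv_lhs => rw [split_system_py_alt]
        rw [ih _ (by simp [List.length_take]; omega) _ rfl,
            ih _ (by simp; omega) _ rfl]
        conv_rhs => rw [← List.take_append_drop ((m1 :: m2 :: rest).length / 2) (m1 :: m2 :: rest)]
        rw [pv_spec_append]

-- ===== VERDICT (by name: the statement is the Claim_ definition above) =====
theorem split_system_py_spec : Claim_equal_split_system_py := by
  intro messages _
  unfold Spec_split_system_py
  rw [pvA_eq_spec, pvB_eq_spec]
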